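-- pv_equiv track=rewrite | github.com/NUinfolab/context | context/nlp/entities.py | collapse_entities
-- ===== SOURCE A (Python) =====
-- def collapse_entities(entity_list):
--     """Return unique list of entity names collapsed into shortest forms"""
--     name_list = []
--
--     for e in entity_list:
--         name_forms = sorted(e['name_forms'], key=lambda s: len(s))
--         while name_forms:
--             name = name_forms.pop(0)
--             for i in range(len(name_forms) - 1, -1, -1):
--                 s = name_forms[i]
--                 if s.find(name) > -1:
--                     del name_forms[i]
--             if name not in name_list:
--                 name_list.append(name)
--         name_list.extend([s for s in name_forms if s not in name_list])
--
--     return name_list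
-- ===== SOURCE B (Python) =====
-- def collapse_entities(entity_list):
--     """Return unique list of entity names collapsed into shortest forms"""
--     name_list = []
--     for e in entity_list:
--         kept = []
--         for name in sorted(e['name_forms'], key=len):
--             if not any(k in name for k in kept):
--                 kept.append(name)
--                 if name not in name_list:
--                     name_list.append(name)
--     return name_list
-- ===== Notes on version B (the rewrite author's own statement) =====
-- stated objective: simpler
-- what changed: Replaces A's destructive worklist (pop(0) from the sorted forms, then a reverse-index del-scan removing every later form containing the popped one) with a single forward pass over the sorted forms that keeps a growing accumulator and adds a form only if it contains no already-kept form; the dead final extend (name_forms is always empty there) is dropped.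
import Mathlib
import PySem

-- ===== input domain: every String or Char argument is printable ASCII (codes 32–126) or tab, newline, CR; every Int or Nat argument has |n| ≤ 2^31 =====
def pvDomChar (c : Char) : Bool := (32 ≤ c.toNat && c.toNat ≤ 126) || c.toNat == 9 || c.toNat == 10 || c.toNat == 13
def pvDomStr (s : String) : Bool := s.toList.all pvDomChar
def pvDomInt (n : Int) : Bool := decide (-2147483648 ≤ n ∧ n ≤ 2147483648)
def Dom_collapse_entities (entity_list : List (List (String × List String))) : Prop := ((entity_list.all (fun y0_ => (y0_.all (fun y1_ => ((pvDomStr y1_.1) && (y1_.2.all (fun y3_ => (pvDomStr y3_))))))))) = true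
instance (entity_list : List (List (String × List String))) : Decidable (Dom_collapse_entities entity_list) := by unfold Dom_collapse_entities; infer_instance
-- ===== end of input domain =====

-- B replaces A's destructive pop(0)/reverse-delete worklist by a single accumulator-filter
-- pass over the length-sorted forms (objective: simpler); return values agree wherever A returns.

-- ===== PORT A =====
-- e['name_forms']: first matching key (Pre_ guarantees the key is present; Python raises KeyError otherwise)
def lookupNF_A (e : List (String × List String)) : List String :=
  ((e.find? (fun p => p.1 == "name_forms")).map Prod.snd).getD []

-- the inner 'for i in range(len(name_forms)-1,-1,-1): … del name_forms[i]' loop,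
-- scanning indices from the back, i.e. a foldr
def delLoop (name : String) (xs : List String) : List String :=
  xs.foldr (fun s acc => if PySem.Str.find s name > -1 then acc else s :: acc) []

-- used only for aWhile's termination
theorem delLoop_length_le (name : String) (xs : List String) :
    (delLoop name xs).length ≤ xs.length := by
  unfold delLoop
  induction xs with
  | nil => simp
  | cons x xs ih =>
    simp only [List.foldr_cons]
    split
    · exact Nat.le_succ_of_le ih
    · simpa using Nat.succ_le_succ ih

-- the 'while name_forms:' loop: pop the shortest form, delete every later form
-- containing it, dedup-append it to name_list
def aWhile : List String → List String → List String
  | [], name_list => name_list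
  | name :: name_forms, name_list =>
    aWhile (delLoop name name_forms)
      (if name ∈ name_list then name_list else name_list ++ [name])
  termination_by nf _ => nf.length
  decreasing_by
    exact Nat.lt_succ_of_le (delLoop_length_le name name_forms)

-- the final 'name_list.extend([...])' runs with name_forms == [] (the while loop emptied it)
-- and appends nothing, so it is the identity here
def collapse_entities (entity_list : List (List (String × List String))) : List String :=
  entity_list.foldl
    (fun name_list e =>
      aWhile (PySem.List.sorted (lookupNF_A e) (fun s => PySem.Str.len s) false) name_list)
    []

-- ===== PORT B =====
def lookupNF_B (e : List (String × List String)) : List String :=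
  ((e.find? (fun p => p.1 == "name_forms")).map Prod.snd).getD []

-- state = (kept, name_list); keep a form iff it contains no already-kept form
def bStep (st : List String × List String) (name : String) : List String × List String :=
  if st.1.any (fun k => PySem.Str.isIn k name) then st
  else (st.1 ++ [name], if name ∈ st.2 then st.2 else st.2 ++ [name])

def collapse_entities_alt (entity_list : List (List (String × List String))) : List String :=
  entity_list.foldl
    (fun name_list e =>
      ((PySem.List.sorted (lookupNF_B e) (fun s => PySem.Str.len s) false).foldl
        bStep ([], name_list)).2)
    []

-- ===== PRECONDITION & SPEC =====
-- Pre_ excludes exactly the inputs where an entity dict lacks the key 'name_forms',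
-- on which the Python A raises KeyError.
def Pre_collapse_entities (entity_list : List (List (String × List String))) : Prop :=
  ∀ e ∈ entity_list, (e.find? (fun p => p.1 == "name_forms")).isSome = true
instance (entity_list : List (List (String × List String))) : Decidable (Pre_collapse_entities entity_list) := by unfold Pre_collapse_entities; infer_instance

def pvWitness_collapse_entities : (List (List (String × List String))) :=
  [[("name_forms", ["New York", "York", "New York City"])], [("name_forms", ["ab", "b"])]]

def Spec_collapse_entities (entity_list : List (List (String × List String))) (out : List String) : Prop := out = collapse_entities_alt entity_list
instance (entity_list : List (List (String × List String))) (out : List String) : Decidable (Spec_collapse_entities entity_list out) := by unfold Spec_collapse_entities; infer_instance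

-- ===== CLAIM (what is proved, stated in full; the proofs are below) =====
def Claim_equal_collapse_entities : Prop := ∀ (entity_list : List (List (String × List String))), Dom_collapse_entities entity_list → Pre_collapse_entities entity_list → Spec_collapse_entities entity_list (collapse_entities entity_list)

-- ===== LEMMAS AND PROOFS =====

-- the reverse-index deletion loop is a filter: 'delete s if name in s'
theorem delLoop_eq_filter (name : String) (xs : List String) :
    delLoop name xs = xs.filter (fun s => !(PySem.Str.isIn name s)) := by
  unfold delLoop
  induction xs with
  | nil => rfl
  | cons x xs ih =>
    rw [List.foldr_cons, List.filter_cons, ih]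
    simp only [PySem.Str.find_eq, PySem.Str.isIn_eq]
    by_cases h : (-1 : Int) < PySem.Chars.find x.toList name.toList
    · have hd : PySem.Chars.isIn name.toList x.toList = true :=
        (PySem.Chars.isIn_iff_infix _ _).mpr ((PySem.Chars.find_nonneg_iff _ _).mp (by omega))
      simp [h, hd]
    · have hd : PySem.Chars.isIn name.toList x.toList = false :=
        (PySem.Chars.isIn_eq_false_iff _ _).mpr
          (fun hc => h (by have := (PySem.Chars.find_nonneg_iff _ _).mpr hc; omega))
      simp [h, hd]

def keptOK (kept : List String) (s : String) : Bool :=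
  kept.all (fun k => !(PySem.Str.isIn k s))

theorem keptOK_eq_not_any (kept : List String) (name : String) :
    keptOK kept name = !(kept.any fun k => PySem.Str.isIn k name) := by
  rw [keptOK, List.all_eq_not_any_not]
  simp

theorem filter_filter' {a : Type} (p q : a → Bool) (l : List a) :
    (l.filter p).filter q = l.filter (fun x => p x && q x) := by
  induction l with
  | nil => rfl
  | cons x xs ih =>
    by_cases hp : p x = true <;> by_cases hq : q x = true <;>
      simp [hp, hq, ih]

-- core invariant: A's worklist loop, run on the forms containing no already-kept form,
-- equals B's accumulator pass carrying that kept list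
theorem aWhile_eq_foldl (forms : List String) :
    ∀ (kept nl : List String),
      aWhile (forms.filter (keptOK kept)) nl = (forms.foldl bStep (kept, nl)).2 := by
  induction forms with
  | nil =>
    intro kept nl
    rw [List.filter_nil, aWhile, List.foldl_nil]
  | cons name rest ih =>
    intro kept nl
    rw [List.filter_cons, List.foldl_cons]
    by_cases h : (kept.any fun k => PySem.Str.isIn k name) = true
    · have hko : keptOK kept name = false := by rw [keptOK_eq_not_any, h]; rfl
      rw [hko, if_neg (by simp)]
      have hb : bStep (kept, nl) name = (kept, nl) := by
        simp only [bStep]; rw [if_pos h]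
      rw [hb]
      exact ih kept nl
    · have h' : (kept.any fun k => PySem.Str.isIn k name) = false := by
        revert h; cases (kept.any fun k => PySem.Str.isIn k name) <;> simp
      have hko : keptOK kept name = true := by rw [keptOK_eq_not_any, h']; rfl
      rw [hko, if_pos rfl]
      have hb : bStep (kept, nl) name
          = (kept ++ [name], if name ∈ nl then nl else nl ++ [name]) := by
        simp only [bStep]; rw [if_neg h]
      rw [hb, aWhile, delLoop_eq_filter, filter_filter']
      have hpred : (rest.filter (fun s => keptOK kept s && !(PySem.Str.isIn name s)))
          = rest.filter (keptOK (kept ++ [name])) :=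
        List.filter_congr (fun s _ => by simp [keptOK, List.all_append])
      rw [hpred]
      exact ih (kept ++ [name]) _

theorem filter_keptOK_nil (xs : List String) : xs.filter (keptOK []) = xs := by
  simp [keptOK]

theorem collapse_entities_eq_alt (el : List (List (String × List String))) :
    collapse_entities el = collapse_entities_alt el := by
  unfold collapse_entities collapse_entities_alt
  induction el using List.reverseRecOn with
  | nil => rfl
  | append_singleton es e ih =>
    rw [List.foldl_append, List.foldl_append, List.foldl_cons, List.foldl_cons,
        List.foldl_nil, List.foldl_nil, ih]
    have hl : lookupNF_A e = lookupNF_B e := rfl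
    rw [hl]
    conv_lhs => rw [← filter_keptOK_nil
      (PySem.List.sorted (lookupNF_B e) (fun s => PySem.Str.len s) false)]
    exact aWhile_eq_foldl _ [] _

-- ===== VERDICT (by name: the statement is the Claim_ definition above) =====
theorem collapse_entities_spec : Claim_equal_collapse_entities := by
  intro entity_list _ _
  exact collapse_entities_eq_alt entity_list
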